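-- pv_equiv track=rewrite | github.com/mintoeto/oh-my-logo-CJK | src/oh_my_logo_cjk/render.py | _bbox_of_filled
-- ===== SOURCE A (Python) =====
-- from typing import List, Tuple, Dict, Any
--
-- def _bbox_of_filled(px_grid: List[List[bool]]) -> Tuple[int, int, int, int] | None:
--     min_x = None
--     min_y = None
--     max_x = None
--     max_y = None
--     for y, row in enumerate(px_grid):
--         for x, on in enumerate(row):
--             if on:
--                 if min_x is None or x < min_x:
--                     min_x = x
--                 if max_x is None or x > max_x:
--                     max_x = x
--                 if min_y is None or y < min_y:
--                     min_y = y
--                 if max_y is None or y > max_y: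
--                     max_y = y
--     if min_x is None:
--         return None
--     return min_x, min_y, max_x, max_y
-- ===== SOURCE B (Python) =====
-- from typing import List, Tuple
--
--
-- def _bbox_of_filled(px_grid: List[List[bool]]) -> Tuple[int, int, int, int] | None:
--     # Collect-then-reduce: gather all filled coordinates first, then take extremes.
--     pts = [(x, y)
--            for y, row in enumerate(px_grid)
--            for x, on in enumerate(row)
--            if on]
--     if not pts:
--         return None
--     xs = [p[0] for p in pts]
--     ys = [p[1] for p in pts]
--     return (min(xs), min(ys), max(xs), max(ys))
-- ===== Notes on version B (the rewrite author's own statement) =====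
-- stated objective: simpler
-- what changed: B replaces A's four threaded Optional min/max accumulators inside the nested scan by a two-phase collect-then-reduce: one comprehension gathering filled (x, y) coordinates, then plain min/max over the collected lists (None exactly when nothing was collected).
import Mathlib
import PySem

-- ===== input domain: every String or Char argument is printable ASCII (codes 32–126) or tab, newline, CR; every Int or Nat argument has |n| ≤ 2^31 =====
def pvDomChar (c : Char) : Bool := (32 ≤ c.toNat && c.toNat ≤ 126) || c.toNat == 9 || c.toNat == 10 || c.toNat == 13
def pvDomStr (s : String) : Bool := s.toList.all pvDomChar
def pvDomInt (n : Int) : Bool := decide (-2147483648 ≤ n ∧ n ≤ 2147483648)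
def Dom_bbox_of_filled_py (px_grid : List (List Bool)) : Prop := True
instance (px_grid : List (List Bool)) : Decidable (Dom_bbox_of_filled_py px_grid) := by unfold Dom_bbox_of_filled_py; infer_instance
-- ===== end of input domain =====

-- B replaces A's four threaded Optional min/max accumulators by a two-phase
-- collect-then-reduce (gather filled coordinates, then min/max); objective: simpler.


-- ===== PORT A =====
-- state = (min_x, max_x, min_y, max_y); each component updated exactly as A's
-- 'if v is None or t < v / t > v' branches
def bboxStepA (s : Option Int × Option Int × Option Int × Option Int) (y x : Int) :
    Option Int × Option Int × Option Int × Option Int :=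
  let mnx := match s.1 with | none => some x | some v => if x < v then some x else some v
  let mxx := match s.2.1 with | none => some x | some v => if x > v then some x else some v
  let mny := match s.2.2.1 with | none => some y | some v => if y < v then some y else some v
  let mxy := match s.2.2.2 with | none => some y | some v => if y > v then some y else some v
  (mnx, mxx, mny, mxy)

def bbox_of_filled_py (px_grid : List (List Bool)) : Option (Int × Int × Int × Int) :=
  let s := (PySem.List.enumerate px_grid).foldl
    (fun s yr => (PySem.List.enumerate yr.2).foldl
        (fun s xo => if xo.2 then bboxStepA s yr.1 xo.1 else s) s)
    (none, none, none, none)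
  -- A tests 'min_x is None'; in every run all four are None together, so this
  -- match is the same test
  match s with
  | (some mnx, some mxx, some mny, some mxy) => some (mnx, mny, mxx, mxy)
  | _ => none

-- ===== PORT B =====
-- the comprehension of Source B: all filled coordinates (x, y) in scan order
def bboxPts (px_grid : List (List Bool)) : List (Int × Int) :=
  (PySem.List.enumerate px_grid).flatMap
    (fun yr => (PySem.List.enumerate yr.2).filterMap
        (fun xo => if xo.2 then some (xo.1, yr.1) else none))

def bbox_of_filled_py_alt (px_grid : List (List Bool)) : Option (Int × Int × Int × Int) :=
  match bboxPts px_grid with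
  | [] => none
  | p :: rest =>
      -- min(xs)/min(ys)/max(xs)/max(ys) on the nonempty collected lists
      -- (the running-min/max shape of PySem.List.min?_id_cons / max?_id_cons)
      some ((rest.map Prod.fst).foldl min p.1,
            (rest.map Prod.snd).foldl min p.2,
            (rest.map Prod.fst).foldl max p.1,
            (rest.map Prod.snd).foldl max p.2)

-- ===== PRECONDITION & SPEC =====
def Spec_bbox_of_filled_py (px_grid : List (List Bool)) (out : Option (Int × Int × Int × Int)) : Prop := out = bbox_of_filled_py_alt px_grid
instance (px_grid : List (List Bool)) (out : Option (Int × Int × Int × Int)) : Decidable (Spec_bbox_of_filled_py px_grid out) := by unfold Spec_bbox_of_filled_py; infer_instance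

-- ===== CLAIM (what is proved, stated in full; the proofs are below) =====
def Claim_equal_bbox_of_filled_py : Prop := ∀ (px_grid : List (List Bool)), Dom_bbox_of_filled_py px_grid → Spec_bbox_of_filled_py px_grid (bbox_of_filled_py px_grid)

-- ===== LEMMAS AND PROOFS =====

-- A's inner row loop is a fold of bboxStepA over that row's collected points
theorem bbox_row_fold (y : Int) (row : List (Int × Bool)) (s : Option Int × Option Int × Option Int × Option Int) :
    row.foldl (fun s xo => if xo.2 then bboxStepA s y xo.1 else s) s
      = (row.filterMap (fun xo => if xo.2 then some (xo.1, y) else none)).foldl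
          (fun s p => bboxStepA s p.2 p.1) s := by
  induction row generalizing s with
  | nil => rfl
  | cons h t ih =>
      cases h with
      | mk x on =>
        cases on <;> simp [ih]

-- A's nested loops are one fold of bboxStepA over all collected points
theorem bbox_nested_fold (px_grid : List (List Bool)) (s : Option Int × Option Int × Option Int × Option Int) :
    (PySem.List.enumerate px_grid).foldl
      (fun s yr => (PySem.List.enumerate yr.2).foldl
          (fun s xo => if xo.2 then bboxStepA s yr.1 xo.1 else s) s) s
      = (bboxPts px_grid).foldl (fun s p => bboxStepA s p.2 p.1) s := by
  unfold bboxPts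
  rw [List.foldl_flatMap]
  exact PySem.List.foldl_congr_mem _ _ _ _ (fun s (yr : Int × List Bool) _ => bbox_row_fold yr.1 (PySem.List.enumerate yr.2) s)

-- once all four accumulators are set, A's fold computes the four running extremes
theorem bbox_fold_some (L : List (Int × Int)) (a b c d : Int) :
    L.foldl (fun s p => bboxStepA s p.2 p.1) (some a, some b, some c, some d)
      = (some ((L.map Prod.fst).foldl min a), some ((L.map Prod.fst).foldl max b),
         some ((L.map Prod.snd).foldl min c), some ((L.map Prod.snd).foldl max d)) := by
  induction L generalizing a b c d with
  | nil => rfl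
  | cons p t ih =>
      have hs : bboxStepA (some a, some b, some c, some d) p.2 p.1
          = (some (min a p.1), some (max b p.1), some (min c p.2), some (max d p.2)) := by
        simp only [bboxStepA]
        refine Prod.ext ?_ (Prod.ext ?_ (Prod.ext ?_ ?_)) <;>
          · simp only []
            split <;> simp <;> omega
      simp only [List.foldl_cons, List.map_cons, hs, ih]

-- ===== VERDICT (by name: the statement is the Claim_ definition above) =====
theorem bbox_of_filled_py_spec : Claim_equal_bbox_of_filled_py := by
  intro g _
  unfold Spec_bbox_of_filled_py bbox_of_filled_py bbox_of_filled_py_alt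
  rw [bbox_nested_fold]
  cases h : bboxPts g with
  | nil => simp
  | cons p rest =>
      have hstep : bboxStepA (none, none, none, none) p.2 p.1
          = (some p.1, some p.1, some p.2, some p.2) := by simp [bboxStepA]
      simp [List.foldl_cons, hstep, bbox_fold_some]
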